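-- pv_equiv track=rewrite | github.com/cafrii/omega2 | 백준/Gold/1976. 여행 가자/1976.py | solve
-- ===== SOURCE A (Python) =====
-- def solve(grid:list[list[int]], plan:list[int])->str:
--     '''
--     city number starts from zero for grid,plan
--     Returns:
--         'YES' or 'NO' depending on plan
--     '''
--     N,M = len(grid),len(plan)
--
--     roots = list(range(N))
--
--     def find_root(a:int)->int:
--         if a == roots[a]: return a
--         stack = []
--         while a != roots[a]:
--             stack.append(a)
--             a = roots[a]
--         for s in stack: roots[s] = a
--         return a
--     # dsu
--     for a in range(N):
--         # 대각선 위쪽의 upper triangle 만 고려하면 됨.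
--         for b in range(a+1, N):
--             if not grid[a][b]: continue # no way
--             # make (a,b) union
--             ra,rb = find_root(a),find_root(b)
--             if ra == rb: continue # already in set
--             roots[b] = roots[rb] = ra
--     # check plan
--     # 모든 도시가 하나의 set 에 포함되어 있다면 ok.
--     a = find_root(plan[0])
--     for k in range(1,M):
--         if a != find_root(plan[k]):
--             return 'NO'
--     return 'YES'
-- ===== SOURCE B (Python) =====
-- def solve(grid: list[list[int]], plan: list[int]) -> str:
--     n = len(grid)
--     visited = [False] * n
--     stack = [plan[0]]
--     visited[plan[0]] = True
--     while stack:
--         u = stack.pop()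
--         for v in range(n):
--             if not visited[v] and grid[min(u, v)][max(u, v)]:
--                 visited[v] = True
--                 stack.append(v)
--     return 'YES' if all(visited[c] for c in plan) else 'NO'
-- ===== Notes on version B (the rewrite author's own statement) =====
-- stated objective: idiomatic
-- what changed: Replaces the union-find (DSU with path compression) over all upper-triangle pairs by a stack-based flood fill from plan[0] with a boolean visited array, then checks that every plan city was visited.
-- outside the precondition, e.g. on solve([[1, 1], [0, 1]], [-1, 0]): A returns 'YES', B returns 'NO'
import Mathlib
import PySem

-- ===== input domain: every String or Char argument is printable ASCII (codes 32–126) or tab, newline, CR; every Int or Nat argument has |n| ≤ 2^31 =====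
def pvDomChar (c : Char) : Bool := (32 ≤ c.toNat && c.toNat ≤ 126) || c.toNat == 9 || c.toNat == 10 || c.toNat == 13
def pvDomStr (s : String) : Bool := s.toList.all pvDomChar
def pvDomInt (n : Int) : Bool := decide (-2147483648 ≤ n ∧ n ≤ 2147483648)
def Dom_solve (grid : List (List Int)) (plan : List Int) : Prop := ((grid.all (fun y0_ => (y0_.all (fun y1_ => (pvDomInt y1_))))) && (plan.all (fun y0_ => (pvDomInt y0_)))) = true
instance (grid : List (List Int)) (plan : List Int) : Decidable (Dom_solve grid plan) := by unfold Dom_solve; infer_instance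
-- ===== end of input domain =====

-- B replaces A's union-find (DSU with path compression) over all upper-triangle pairs by a
-- stack-based flood fill from plan[0] with a visited set (objective: idiomatic reachability check).

-- ===== PORT A =====
-- roots[i] (Python list indexing, total form; indices stay in range under Pre_solve)
def pvGetI (xs : List Int) (i : Int) : Int := PySem.List.pyGetD xs i 0

-- the 'while a != roots[a]' climb of find_root, collecting the stack; fuel bounds the climb
-- (under Pre_solve a root is always reached in at most roots.length steps, see pvChase_spec)
def pvChase : Nat → List Int → Int → List Int → List Int × Int
  | 0, _, a, st => (st, a)
  | fuel+1, roots, a, st =>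
    if a = pvGetI roots a then (st, a)
    else pvChase fuel roots (pvGetI roots a) (st ++ [a])

-- find_root with path compression: returns the updated roots list and the root
def pvFindRoot (roots : List Int) (a : Int) : List Int × Int :=
  if a = pvGetI roots a then (roots, a)
  else
    let p := pvChase (roots.length + 1) roots a []
    (p.1.foldl (fun rs s => PySem.List.pySetD rs s p.2) roots, p.2)

-- grid[a][b]
def pvEntry (grid : List (List Int)) (a b : Int) : Int :=
  PySem.List.pyGetD (PySem.List.pyGetD grid a []) b 0

-- body of the inner dsu loop for one pair (a, b)
def pvUnion (grid : List (List Int)) (roots : List Int) (a b : Int) : List Int :=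
  if pvEntry grid a b = 0 then roots
  else
    let fa := pvFindRoot roots a
    let fb := pvFindRoot fa.1 b
    if fa.2 = fb.2 then fb.1
    else PySem.List.pySetD (PySem.List.pySetD fb.1 b fa.2) fb.2 fa.2

-- the final 'for k in range(1, M)' check loop with early return
def pvCheckA (a : Int) (roots : List Int) : List Int → String
  | [] => "YES"
  | p :: rest =>
    let f := pvFindRoot roots p
    if a ≠ f.2 then "NO" else pvCheckA a f.1 rest

def solve (grid : List (List Int)) (plan : List Int) : String :=
  let N : Int := (grid.length : Int)
  let roots0 := PySem.List.pyRange 0 N 1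
  let roots1 := (PySem.List.pyRange 0 N 1).foldl
    (fun roots a => (PySem.List.pyRange (a + 1) N 1).foldl (fun r b => pvUnion grid r a b) roots)
    roots0
  match plan with
  | [] => ""   -- Python raises IndexError on plan[0]; excluded by Pre_solve
  | p0 :: rest =>
    let f0 := pvFindRoot roots1 p0
    pvCheckA f0.2 f0.1 rest

-- ===== PORT B =====
-- grid[min(u,v)][max(u,v)]
def pvCell (grid : List (List Int)) (u v : Int) : Int :=
  PySem.List.pyGetD (PySem.List.pyGetD grid (min u v) []) (max u v) 0

-- the 'for v in range(n)' body: mark and push the unvisited neighbours of u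
def pvVisit (grid : List (List Int)) (n : Int) (u : Int) (vs : List Bool × List Int) :
    List Bool × List Int :=
  (PySem.List.pyRange 0 n 1).foldl
    (fun vs v =>
      if PySem.List.pyGetD vs.1 v false = false ∧ pvCell grid u v ≠ 0
      then (PySem.List.pySetD vs.1 v true, vs.2 ++ [v]) else vs)
    vs

-- the 'while stack' loop; fuel bounds the number of pops (each pop either empties the stack
-- or marks fresh cities, so n+1 pops always suffice under Pre_solve, see pvFlood_spec)
def pvFlood (grid : List (List Int)) (n : Int) : Nat → List Bool → List Int → List Bool
  | 0, visited, _ => visited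
  | fuel+1, visited, stack =>
    match PySem.List.pop? stack (-1) with
    | none => visited
    | some (u, rest) =>
      let p := pvVisit grid n u (visited, rest)
      pvFlood grid n fuel p.1 p.2

def solve_alt (grid : List (List Int)) (plan : List Int) : String :=
  let n : Int := (grid.length : Int)
  match plan with
  | [] => ""   -- Python raises IndexError on plan[0]; excluded by Pre_solve
  | p0 :: rest =>
    let visited0 := PySem.List.pySetD (List.replicate grid.length false) p0 true
    let visited := pvFlood grid n (grid.length + 1) visited0 [p0]
    if (p0 :: rest).all (fun c => PySem.List.pyGetD visited c false) then "YES" else "NO"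

-- ===== PRECONDITION & SPEC =====
-- Pre_solve excludes exactly the inputs where Python A does not return an ordinary value of its
-- contract: an empty plan and rows among the first N-1 that are shorter than N (IndexError), plan
-- cities >= N or < -N (IndexError), and a negative start city plan[0] in [-N,0), where A's value
-- is an accident of Python's negative-index wraparound outside the problem's city-number domain.
def Pre_solve (grid : List (List Int)) (plan : List Int) : Prop :=
  plan ≠ [] ∧ 0 ≤ plan.headI ∧
    (∀ p ∈ plan, -(grid.length : Int) ≤ p ∧ p < (grid.length : Int)) ∧
    (∀ r ∈ grid.dropLast, grid.length ≤ r.length)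
instance (grid : List (List Int)) (plan : List Int) : Decidable (Pre_solve grid plan) := by
  unfold Pre_solve; infer_instance

def pvWitness_solve : List (List Int) × List Int := ([[1, 1], [1, 1]], [0, 1])

def Spec_solve (grid : List (List Int)) (plan : List Int) (out : String) : Prop := out = solve_alt grid plan
instance (grid : List (List Int)) (plan : List Int) (out : String) : Decidable (Spec_solve grid plan out) := by unfold Spec_solve; infer_instance

-- ===== CLAIM (what is proved, stated in full; the proofs are below) =====
def Claim_equal_solve : Prop := ∀ (grid : List (List Int)) (plan : List Int), Dom_solve grid plan → Pre_solve grid plan → Spec_solve grid plan (solve grid plan)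

-- ===== LEMMAS AND PROOFS =====

-- ---------- generic: reflexive-transitive closure of a symmetric relation ----------

theorem pvRtg_symm {α : Type} {r : α → α → Prop} (hs : Symmetric r) {x y : α}
    (h : Relation.ReflTransGen r x y) : Relation.ReflTransGen r y x :=
  Relation.ReflTransGen.symmetric hs h

-- adding one (symmetric) edge a—b to a symmetric relation: characterisation of the new closure
theorem pvRtg_pair {α : Type} {r : α → α → Prop} (hs : Symmetric r) (a b x y : α) :
    Relation.ReflTransGen (fun u v => r u v ∨ (u = a ∧ v = b) ∨ (u = b ∧ v = a)) x y ↔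
      (Relation.ReflTransGen r x y ∨
        (Relation.ReflTransGen r x a ∧ Relation.ReflTransGen r b y) ∨
        (Relation.ReflTransGen r x b ∧ Relation.ReflTransGen r a y)) := by
  have hsR : Symmetric (Relation.ReflTransGen r) := Relation.ReflTransGen.symmetric hs
  constructor
  · intro h
    induction h with
    | refl => exact Or.inl Relation.ReflTransGen.refl
    | @tail c d hxc hcd ih =>
      rcases hcd with hr | ⟨rfl, rfl⟩ | ⟨rfl, rfl⟩
      · rcases ih with h1 | ⟨h1, h2⟩ | ⟨h1, h2⟩
        · exact Or.inl (h1.tail hr)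
        · exact Or.inr (Or.inl ⟨h1, h2.tail hr⟩)
        · exact Or.inr (Or.inr ⟨h1, h2.tail hr⟩)
      · rcases ih with h1 | ⟨h1, h2⟩ | ⟨h1, h2⟩
        · exact Or.inr (Or.inl ⟨h1, Relation.ReflTransGen.refl⟩)
        · exact Or.inr (Or.inl ⟨h1, Relation.ReflTransGen.refl⟩)
        · exact Or.inl h1
      · rcases ih with h1 | ⟨h1, h2⟩ | ⟨h1, h2⟩
        · exact Or.inr (Or.inr ⟨h1, Relation.ReflTransGen.refl⟩)
        · exact Or.inl h1
        · exact Or.inr (Or.inl ⟨h1.trans (hsR h2), hsR h2⟩)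
  · have hmono : ∀ {u v : α}, Relation.ReflTransGen r u v →
        Relation.ReflTransGen (fun u v => r u v ∨ (u = a ∧ v = b) ∨ (u = b ∧ v = a)) u v :=
      fun h => Relation.ReflTransGen.mono (fun _ _ hr => Or.inl hr) h
    rintro (h1 | ⟨h1, h2⟩ | ⟨h1, h2⟩)
    · exact hmono h1
    · exact ((hmono h1).tail (Or.inr (Or.inl ⟨rfl, rfl⟩))).trans (hmono h2)
    · exact ((hmono h1).tail (Or.inr (Or.inr ⟨rfl, rfl⟩))).trans (hmono h2)

theorem pvRtg_congr {α : Type} {r s : α → α → Prop} (h : ∀ u v, r u v ↔ s u v) {x y : α} :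
    Relation.ReflTransGen r x y ↔ Relation.ReflTransGen s x y :=
  ⟨fun hh => Relation.ReflTransGen.mono (fun u v hr => (h u v).mp hr) hh,
   fun hh => Relation.ReflTransGen.mono (fun u v hr => (h u v).mpr hr) hh⟩

-- ---------- A-side: the parent-pointer structure ----------

def pvStep (roots : List Int) : Int → Int := fun i => pvGetI roots i

def pvRootOf (roots : List Int) (i : Int) : Int := (pvStep roots)^[roots.length] i

def pvBnd (N : Nat) (roots : List Int) : Prop :=
  roots.length = N ∧ ∀ v ∈ roots, 0 ≤ v ∧ v < (N : Int)

def pvInv (N : Nat) (roots : List Int) : Prop :=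
  pvBnd N roots ∧
    ∀ i : Int, 0 ≤ i → i < (N : Int) →
      ∃ k, pvStep roots ((pvStep roots)^[k] i) = (pvStep roots)^[k] i

def pvReaches (roots : List Int) (x r : Int) : Prop :=
  (∃ k, (pvStep roots)^[k] x = r) ∧ pvStep roots r = r

theorem pvStep_bound {N : Nat} {roots : List Int} (h : pvBnd N roots) {i : Int}
    (h0 : 0 ≤ i) (h1 : i < (N : Int)) : 0 ≤ pvStep roots i ∧ pvStep roots i < (N : Int) := by
  obtain ⟨hlen, hmem⟩ := h
  have hr : PySem.Raise.InRange roots.length i := by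
    unfold PySem.Raise.InRange; omega
  have hm : PySem.List.pyGetD roots i 0 ∈ roots := PySem.List.pyGetD_mem roots 0 hr
  exact hmem _ hm

theorem pvIter_bound {N : Nat} {roots : List Int} (h : pvBnd N roots) {i : Int}
    (h0 : 0 ≤ i) (h1 : i < (N : Int)) (k : Nat) :
    0 ≤ (pvStep roots)^[k] i ∧ (pvStep roots)^[k] i < (N : Int) := by
  induction k with
  | zero => exact ⟨h0, h1⟩
  | succ k ih =>
    rw [Function.iterate_succ_apply']
    exact pvStep_bound h ih.1 ih.2

theorem pvIter_fix {roots : List Int} {r : Int} (h : pvStep roots r = r) (k : Nat) :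
    (pvStep roots)^[k] r = r := by
  induction k with
  | zero => rfl
  | succ k ih => rw [Function.iterate_succ_apply', ih, h]

theorem pvIter_stable {roots : List Int} {x : Int} {k : Nat}
    (h : pvStep roots ((pvStep roots)^[k] x) = (pvStep roots)^[k] x) {j : Nat} (hj : k ≤ j) :
    (pvStep roots)^[j] x = (pvStep roots)^[k] x := by
  obtain ⟨m, rfl⟩ := Nat.exists_eq_add_of_le hj
  rw [Nat.add_comm, Function.iterate_add_apply]
  exact pvIter_fix h m

-- pigeonhole: under the invariant, roots.length iterations always land on the root
theorem pvRootOf_reach {N : Nat} {roots : List Int} (h : pvBnd N roots) {x : Int}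
    (h0 : 0 ≤ x) (h1 : x < (N : Int))
    (ht : ∃ k, pvStep roots ((pvStep roots)^[k] x) = (pvStep roots)^[k] x) :
    pvReaches roots x (pvRootOf roots x) := by
  classical
  have hlen : roots.length = N := h.1
  set k0 := Nat.find ht with hk0
  have hfix0 : pvStep roots ((pvStep roots)^[k0] x) = (pvStep roots)^[k0] x := Nat.find_spec ht
  by_cases hk : k0 ≤ N
  · have hst : (pvStep roots)^[N] x = (pvStep roots)^[k0] x := pvIter_stable hfix0 hk
    unfold pvRootOf
    rw [hlen]
    exact ⟨⟨N, rfl⟩, by rw [hst]; exact hfix0⟩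
  · exfalso
    rw [Nat.not_le] at hk
    have hinj : ∀ i j : Nat, i < j → j ≤ N → (pvStep roots)^[i] x ≠ (pvStep roots)^[j] x := by
      intro i j hij hjN heq
      have hper : ∀ m : Nat, (pvStep roots)^[i + m * (j - i)] x = (pvStep roots)^[i] x := by
        intro m
        induction m with
        | zero => simp
        | succ m ih =>
          have he : i + (m + 1) * (j - i) = (j - i) + (i + m * (j - i)) := by
            rw [Nat.succ_mul]; omega
          rw [he, Function.iterate_add_apply, ih]
          have h2 : (j - i) + i = j := by omega
          rw [← Function.iterate_add_apply, h2, ← heq]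
      have hge : k0 ≤ i + k0 * (j - i) := by
        have : 1 ≤ j - i := by omega
        calc k0 = k0 * 1 := (Nat.mul_one k0).symm
        _ ≤ k0 * (j - i) := Nat.mul_le_mul_left _ this
        _ ≤ i + k0 * (j - i) := by omega
      have hik0 : (pvStep roots)^[i + k0 * (j - i)] x = (pvStep roots)^[k0] x := pvIter_stable hfix0 hge
      have hfixi : pvStep roots ((pvStep roots)^[i] x) = (pvStep roots)^[i] x := by
        rw [← hper k0, hik0, hfix0, ← hik0, hper k0]
      exact Nat.find_min ht (by omega : i < k0) hfixi
    have hmaps : ∀ j ∈ Finset.range (N + 1), ((pvStep roots)^[j] x).toNat ∈ Finset.range N := by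
      intro j _
      have hb := pvIter_bound h h0 h1 j
      simp only [Finset.mem_range]
      omega
    have hinjOn : Set.InjOn (fun j => ((pvStep roots)^[j] x).toNat) (Finset.range (N + 1)) := by
      intro i hi j hj heq
      simp only [Finset.coe_range, Set.mem_Iio] at hi hj
      by_contra hne
      have hbi := pvIter_bound h h0 h1 i
      have hbj := pvIter_bound h h0 h1 j
      have heq' : (pvStep roots)^[i] x = (pvStep roots)^[j] x := by simp only [] at heq; omega
      rcases Nat.lt_or_ge i j with hlt | hge
      · exact hinj i j hlt (by omega) heq'
      · exact hinj j i (by omega) (by omega) heq'.symm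
    have hcard := Finset.card_le_card_of_injOn _ hmaps hinjOn
    simp only [Finset.card_range] at hcard
    omega

theorem pvReaches_unique {roots : List Int} {x r r' : Int}
    (h : pvReaches roots x r) (h' : pvReaches roots x r') : r = r' := by
  obtain ⟨⟨k, hk⟩, hfix⟩ := h
  obtain ⟨⟨k', hk'⟩, hfix'⟩ := h'
  have h1 : (pvStep roots)^[max k k'] x = r := by
    have := pvIter_stable (k := k) (x := x) (roots := roots) (by rw [hk]; exact hfix)
      (j := max k k') (le_max_left _ _)
    rw [this, hk]
  have h2 : (pvStep roots)^[max k k'] x = r' := by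
    have := pvIter_stable (k := k') (x := x) (roots := roots) (by rw [hk']; exact hfix')
      (j := max k k') (le_max_right _ _)
    rw [this, hk']
  omega

theorem pvRootOf_eq {N : Nat} {roots : List Int} (h : pvBnd N roots) {x r : Int}
    (h0 : 0 ≤ x) (h1 : x < (N : Int)) (hr : pvReaches roots x r) : pvRootOf roots x = r :=
  pvReaches_unique (pvRootOf_reach h h0 h1 ⟨hr.1.choose, by rw [hr.1.choose_spec]; exact hr.2⟩) hr

theorem pvRootOf_fix {N : Nat} {roots : List Int} (h : pvInv N roots) {x : Int}
    (h0 : 0 ≤ x) (h1 : x < (N : Int)) :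
    pvStep roots (pvRootOf roots x) = pvRootOf roots x :=
  (pvRootOf_reach h.1 h0 h1 (h.2 x h0 h1)).2

theorem pvRootOf_bound {N : Nat} {roots : List Int} (h : pvBnd N roots) {x : Int}
    (h0 : 0 ≤ x) (h1 : x < (N : Int)) :
    0 ≤ pvRootOf roots x ∧ pvRootOf roots x < (N : Int) :=
  pvIter_bound h h0 h1 _

theorem pvRootOf_step {N : Nat} {roots : List Int} (h : pvInv N roots) {x : Int}
    (h0 : 0 ≤ x) (h1 : x < (N : Int)) :
    pvRootOf roots (pvStep roots x) = pvRootOf roots x := by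
  have hb := pvStep_bound h.1 h0 h1
  have hx := pvRootOf_reach h.1 h0 h1 (h.2 x h0 h1)
  refine pvRootOf_eq h.1 hb.1 hb.2 ⟨?_, hx.2⟩
  obtain ⟨⟨k, hk⟩, hfix⟩ := hx
  refine ⟨k, ?_⟩
  rw [← Function.iterate_succ_apply, Function.iterate_succ_apply']
  rw [show (pvStep roots)^[k] x = pvRootOf roots x from hk]
  exact hfix

-- generic transfer: if every node either directly reaches g(root) in the new list or keeps
-- its parent pointer (and g fixes untouched roots), every root moves by g
theorem pvTransfer {N : Nat} {roots roots' : List Int} {g : Int → Int}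
    (h : pvInv N roots) (hb' : pvBnd N roots')
    (H : ∀ x : Int, 0 ≤ x → x < (N : Int) →
      pvReaches roots' x (g (pvRootOf roots x)) ∨
        (pvGetI roots' x = pvGetI roots x ∧ (pvStep roots x = x → g x = x))) :
    pvInv N roots' ∧
      ∀ x : Int, 0 ≤ x → x < (N : Int) → pvRootOf roots' x = g (pvRootOf roots x) := by
  have key : ∀ (k : Nat) (x : Int), 0 ≤ x → x < (N : Int) →
      pvStep roots ((pvStep roots)^[k] x) = (pvStep roots)^[k] x →
      pvReaches roots' x (g (pvRootOf roots x)) := by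
    intro k
    induction k with
    | zero =>
      intro x h0 h1 hfix
      simp only [Function.iterate_zero, id_eq] at hfix
      rcases H x h0 h1 with hd | ⟨hstep, hgfix⟩
      · exact hd
      · have hroot : pvRootOf roots x = x := pvRootOf_eq h.1 h0 h1 ⟨⟨0, rfl⟩, hfix⟩
        rw [hroot, hgfix hfix]
        exact ⟨⟨0, rfl⟩, by show pvGetI roots' x = x; rw [hstep]; exact hfix⟩
    | succ k ih =>
      intro x h0 h1 hfix
      rcases H x h0 h1 with hd | ⟨hstep, hgfix⟩
      · exact hd
      · by_cases hx : pvStep roots x = x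
        · have hroot : pvRootOf roots x = x := pvRootOf_eq h.1 h0 h1 ⟨⟨0, rfl⟩, hx⟩
          rw [hroot, hgfix hx]
          exact ⟨⟨0, rfl⟩, by show pvGetI roots' x = x; rw [hstep]; exact hx⟩
        · have hb := pvStep_bound h.1 h0 h1
          have hfix' : pvStep roots ((pvStep roots)^[k] (pvStep roots x)) =
              (pvStep roots)^[k] (pvStep roots x) := by
            rw [← Function.iterate_succ_apply]; exact hfix
          have hr := ih (pvStep roots x) hb.1 hb.2 hfix'
          rw [pvRootOf_step h h0 h1] at hr
          obtain ⟨⟨k', hk'⟩, hfx⟩ := hr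
          refine ⟨⟨k' + 1, ?_⟩, hfx⟩
          rw [Function.iterate_succ_apply]
          show (pvStep roots')^[k'] (pvGetI roots' x) = _
          rw [hstep]
          exact hk'
  constructor
  · refine ⟨hb', ?_⟩
    intro i h0 h1
    obtain ⟨k, hk⟩ := h.2 i h0 h1
    obtain ⟨⟨k', hk'⟩, hfx⟩ := key k i h0 h1 hk
    exact ⟨k', by rw [hk']; exact hfx⟩
  · intro x h0 h1
    obtain ⟨k, hk⟩ := h.2 x h0 h1
    exact pvRootOf_eq hb' h0 h1 (key k x h0 h1 hk)

-- updating one cell: the new parent function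
theorem pvSet_get {N : Nat} {roots : List Int} (hlen : roots.length = N) {s i : Int} (v : Int)
    (hs0 : 0 ≤ s) (hs1 : s < (N : Int)) (hi0 : 0 ≤ i) (hi1 : i < (N : Int)) :
    pvGetI (PySem.List.pySetD roots s v) i = if i = s then v else pvGetI roots i := by
  have hset : PySem.List.pySetD roots s v = roots.set s.toNat v :=
    PySem.List.pySetD_of_nonneg roots v hs0
  have hll : (roots.set s.toNat v).length = roots.length := by simp
  unfold pvGetI
  rw [hset, PySem.List.pyGetD_eq_getElem (roots.set s.toNat v) 0 hi0 (by omega),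
    PySem.List.pyGetD_eq_getElem roots 0 hi0 (by omega)]
  rw [List.getElem_set]
  by_cases he : i = s
  · subst he; simp
  · have : s.toNat ≠ i.toNat := by omega
    simp [this, he]

-- path compression step: pointing s at its own root changes no root
theorem pvSet_root {N : Nat} {roots : List Int} (h : pvInv N roots) {s : Int}
    (hs0 : 0 ≤ s) (hs1 : s < (N : Int)) :
    pvInv N (PySem.List.pySetD roots s (pvRootOf roots s)) ∧
      ∀ x : Int, 0 ≤ x → x < (N : Int) →
        pvRootOf (PySem.List.pySetD roots s (pvRootOf roots s)) x = pvRootOf roots x := by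
  have hlen : roots.length = N := h.1.1
  have hrb := pvRootOf_bound h.1 hs0 hs1
  have hfixr : pvStep roots (pvRootOf roots s) = pvRootOf roots s := pvRootOf_fix h hs0 hs1
  have hb' : pvBnd N (PySem.List.pySetD roots s (pvRootOf roots s)) := by
    refine ⟨by rw [PySem.List.length_pySetD]; exact hlen, ?_⟩
    intro v hv
    rw [PySem.List.pySetD_of_nonneg roots _ hs0] at hv
    rcases List.mem_or_eq_of_mem_set hv with hv | rfl
    · exact h.1.2 v hv
    · exact hrb
  have := pvTransfer (g := fun t => t) h hb' ?_
  · exact ⟨this.1, fun x h0 h1 => this.2 x h0 h1⟩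
  · intro x h0 h1
    by_cases hx : x = s
    · subst hx
      left
      have hstep' : pvGetI (PySem.List.pySetD roots x (pvRootOf roots x)) x = pvRootOf roots x := by
        rw [pvSet_get hlen _ hs0 hs1 hs0 hs1]; simp
      have hfix' : pvStep (PySem.List.pySetD roots x (pvRootOf roots x)) (pvRootOf roots x) =
          pvRootOf roots x := by
        show pvGetI _ _ = _
        rw [pvSet_get hlen _ hs0 hs1 hrb.1 hrb.2]
        by_cases hrs : pvRootOf roots x = x
        · simp [hrs]
        · simp only [if_neg hrs]; exact hfixr
      exact ⟨⟨1, by rw [Function.iterate_one]; exact hstep'⟩, hfix'⟩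
    · right
      refine ⟨?_, fun _ => rfl⟩
      rw [pvSet_get hlen _ hs0 hs1 h0 h1, if_neg hx]

-- union step: roots[b] = roots[rb] = ra collapses the class of rb into that of ra
theorem pvSet_union {N : Nat} {roots : List Int} (h : pvInv N roots) {b ra rb : Int}
    (hb0 : 0 ≤ b) (hb1 : b < (N : Int)) (hra0 : 0 ≤ ra) (hra1 : ra < (N : Int))
    (hrb0 : 0 ≤ rb) (hrb1 : rb < (N : Int))
    (hfa : pvStep roots ra = ra) (hfb : pvStep roots rb = rb)
    (hrb : pvRootOf roots b = rb) (hne : ra ≠ rb) :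
    pvInv N (PySem.List.pySetD (PySem.List.pySetD roots b ra) rb ra) ∧
      ∀ x : Int, 0 ≤ x → x < (N : Int) →
        pvRootOf (PySem.List.pySetD (PySem.List.pySetD roots b ra) rb ra) x =
          if pvRootOf roots x = rb then ra else pvRootOf roots x := by
  have hlen : roots.length = N := h.1.1
  set roots2 := PySem.List.pySetD (PySem.List.pySetD roots b ra) rb ra with hr2
  have hlen1 : (PySem.List.pySetD roots b ra).length = N := by
    rw [PySem.List.length_pySetD]; exact hlen
  have hget2 : ∀ i : Int, 0 ≤ i → i < (N : Int) →
      pvGetI roots2 i = if i = rb then ra else if i = b then ra else pvGetI roots i := by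
    intro i h0 h1
    rw [hr2, pvSet_get hlen1 _ hrb0 hrb1 h0 h1, pvSet_get hlen _ hb0 hb1 h0 h1]
  have hb' : pvBnd N roots2 := by
    refine ⟨by rw [hr2, PySem.List.length_pySetD]; exact hlen1, ?_⟩
    intro v hv
    rw [hr2, PySem.List.pySetD_of_nonneg _ _ hrb0] at hv
    rcases List.mem_or_eq_of_mem_set hv with hv | rfl
    · rw [PySem.List.pySetD_of_nonneg _ _ hb0] at hv
      rcases List.mem_or_eq_of_mem_set hv with hv | rfl
      · exact h.1.2 v hv
      · exact ⟨hra0, hra1⟩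
    · exact ⟨hra0, hra1⟩
  have hfix2ra : pvStep roots2 ra = ra := by
    show pvGetI roots2 ra = ra
    rw [hget2 ra hra0 hra1, if_neg hne]
    by_cases hab : ra = b
    · simp [hab]
    · simp only [if_neg hab]; exact hfa
  have := pvTransfer (g := fun t => if t = rb then ra else t) h hb' ?_
  · exact this
  · intro x h0 h1
    by_cases hx : x = rb
    · subst hx
      left
      have hrootx : pvRootOf roots x = x := pvRootOf_eq h.1 h0 h1 ⟨⟨0, rfl⟩, hfb⟩
      rw [hrootx]
      have hbeta : ((fun t => if t = x then ra else t) x) = ra := by simp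
      rw [hbeta]
      refine ⟨⟨1, ?_⟩, hfix2ra⟩
      rw [Function.iterate_one]
      show pvGetI roots2 x = ra
      rw [hget2 x h0 h1, if_pos rfl]
    · by_cases hxb : x = b
      · subst hxb
        left
        rw [hrb]
        have hbeta : ((fun t => if t = rb then ra else t) rb) = ra := by simp
        rw [hbeta]
        refine ⟨⟨1, ?_⟩, hfix2ra⟩
        rw [Function.iterate_one]
        show pvGetI roots2 x = ra
        rw [hget2 x h0 h1, if_neg hx, if_pos rfl]
      · right
        refine ⟨?_, ?_⟩
        · rw [hget2 x h0 h1, if_neg hx, if_neg hxb]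
        · intro _
          simp only [if_neg hx]

theorem pvChase_spec {N : Nat} {roots : List Int} (h : pvInv N roots) :
    ∀ (fuel m : Nat) (a : Int) (st : List Int), m < fuel → 0 ≤ a → a < (N : Int) →
      pvStep roots ((pvStep roots)^[m] a) = (pvStep roots)^[m] a →
      (pvChase fuel roots a st).2 = pvRootOf roots a ∧
        ∃ suf : List Int, (pvChase fuel roots a st).1 = st ++ suf ∧
          ∀ s ∈ suf, 0 ≤ s ∧ s < (N : Int) ∧ pvRootOf roots s = pvRootOf roots a := by
  intro fuel
  induction fuel with
  | zero => intro m a st hm; omega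
  | succ fuel ih =>
    intro m a st hm h0 h1 hfix
    by_cases ha : a = pvGetI roots a
    · have hroot : pvRootOf roots a = a := pvRootOf_eq h.1 h0 h1 ⟨⟨0, rfl⟩, ha.symm⟩
      simp only [pvChase, if_pos ha]
      exact ⟨hroot.symm, [], by simp, by simp⟩
    · simp only [pvChase, if_neg ha]
      have hm0 : m ≠ 0 := by
        intro hm0; subst hm0
        simp only [Function.iterate_zero, id_eq] at hfix
        exact ha hfix.symm
      have hb := pvStep_bound h.1 h0 h1
      have hfix' : pvStep roots ((pvStep roots)^[m - 1] (pvGetI roots a)) =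
          (pvStep roots)^[m - 1] (pvGetI roots a) := by
        have hs : (pvStep roots)^[m - 1] (pvGetI roots a) = (pvStep roots)^[m] a := by
          show (pvStep roots)^[m - 1] (pvStep roots a) = _
          rw [← Function.iterate_succ_apply]
          congr 1
          omega
        rw [hs]; exact hfix
      obtain ⟨hih1, suf, hsuf, hall⟩ :=
        ih (m - 1) (pvGetI roots a) (st ++ [a]) (by omega) hb.1 hb.2 hfix'
      have hrs : pvRootOf roots (pvGetI roots a) = pvRootOf roots a :=
        pvRootOf_step h h0 h1
      refine ⟨by rw [hih1, hrs], a :: suf, ?_, ?_⟩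
      · rw [hsuf, List.append_assoc]
        rfl
      · intro s hs
        rcases List.mem_cons.mp hs with rfl | hs'
        · exact ⟨h0, h1, rfl⟩
        · obtain ⟨q0, q1, q2⟩ := hall s hs'
          exact ⟨q0, q1, by rw [q2, hrs]⟩

-- the path-compression fold: pointing every collected node at the common root
theorem pvCompress {N : Nat} {roots : List Int} {r : Int} :
    ∀ (chain cur : List Int), pvInv N cur →
      (∀ x : Int, 0 ≤ x → x < (N : Int) → pvRootOf cur x = pvRootOf roots x) →
      (∀ s ∈ chain, 0 ≤ s ∧ s < (N : Int) ∧ pvRootOf roots s = r) →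
      pvInv N (chain.foldl (fun rs s => PySem.List.pySetD rs s r) cur) ∧
        ∀ x : Int, 0 ≤ x → x < (N : Int) →
          pvRootOf (chain.foldl (fun rs s => PySem.List.pySetD rs s r) cur) x =
            pvRootOf roots x := by
  intro chain
  induction chain with
  | nil => intro cur hc hpres _; exact ⟨hc, hpres⟩
  | cons s rest ihc =>
    intro cur hc hpres hall
    obtain ⟨hs0, hs1, hsr⟩ := hall s List.mem_cons_self
    have hval : r = pvRootOf cur s := by
      rw [hpres s hs0 hs1, hsr]
    simp only [List.foldl_cons]
    have hstep : PySem.List.pySetD cur s r =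
        PySem.List.pySetD cur s (pvRootOf cur s) := by rw [hval]
    rw [hstep]
    obtain ⟨hinv', hpres'⟩ := pvSet_root hc hs0 hs1
    exact ihc _ hinv'
      (fun x h0 h1 => by rw [hpres' x h0 h1, hpres x h0 h1])
      (fun t ht => hall t (List.mem_cons_of_mem _ ht))

theorem pvFindRoot_spec {N : Nat} {roots : List Int} (h : pvInv N roots) {a : Int}
    (h0 : 0 ≤ a) (h1 : a < (N : Int)) :
    pvInv N (pvFindRoot roots a).1 ∧ (pvFindRoot roots a).2 = pvRootOf roots a ∧
      ∀ x : Int, 0 ≤ x → x < (N : Int) → pvRootOf (pvFindRoot roots a).1 x = pvRootOf roots x := by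
  have hlen : roots.length = N := h.1.1
  by_cases ha : a = pvGetI roots a
  · have hroot : pvRootOf roots a = a := pvRootOf_eq h.1 h0 h1 ⟨⟨0, rfl⟩, ha.symm⟩
    simp only [pvFindRoot, if_pos ha]
    refine ⟨h, hroot.symm, ?_⟩
    intro x _ _
    trivial
  · simp only [pvFindRoot, if_neg ha]
    have hfixN : pvStep roots ((pvStep roots)^[roots.length] a) =
        (pvStep roots)^[roots.length] a := pvRootOf_fix h h0 h1
    obtain ⟨hch1, suf, hsuf, hall⟩ := pvChase_spec h (roots.length + 1) roots.length a []
      (by omega) h0 h1 hfixN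
    rw [hch1, hsuf]
    simp only [List.nil_append]
    have hres := pvCompress (r := pvRootOf roots a) suf roots h (fun _ _ _ => rfl) hall
    exact ⟨hres.1, trivial, hres.2⟩

-- Python's negative-index wraparound: roots[a] for -N ≤ a < 0 is roots[a + N]
theorem pvGetD_wrap {α : Type} (xs : List α) {N : Nat} (hlen : xs.length = N) {i : Int} (d : α)
    (h0 : -(N : Int) ≤ i) (h1 : i < 0) :
    PySem.List.pyGetD xs i d = PySem.List.pyGetD xs (i + N) d := by
  unfold PySem.List.pyGetD PySem.List.pyGet? PySem.List.pyIdx?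
  rw [hlen]
  have ha : ¬ (0 : Int) ≤ i := by omega
  have hb : (0 : Int) ≤ i + N := by omega
  have hc : i + N < (N : Int) := by omega
  simp only [if_neg ha, if_pos h0, if_pos hb, if_pos hc]
  have he : N - (-i).toNat = (i + (N : Int)).toNat := by omega
  rw [he]

theorem pvSetD_wrap {α : Type} (xs : List α) {N : Nat} (hlen : xs.length = N) {i : Int} (v : α)
    (h0 : -(N : Int) ≤ i) (h1 : i < 0) :
    PySem.List.pySetD xs i v = PySem.List.pySetD xs (i + N) v := by
  unfold PySem.List.pySetD PySem.List.pySet? PySem.List.pyIdx?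
  rw [hlen]
  have ha : ¬ (0 : Int) ≤ i := by omega
  have hb : (0 : Int) ≤ i + N := by omega
  have hc : i + N < (N : Int) := by omega
  simp only [if_neg ha, if_pos h0, if_pos hb, if_pos hc]
  have he : N - (-i).toNat = (i + (N : Int)).toNat := by omega
  rw [he]

-- find_root called on a negative city: Python wraps, so it resolves city a + N
theorem pvFindRoot_neg {N : Nat} {roots : List Int} (h : pvInv N roots) {a : Int}
    (h0 : -(N : Int) ≤ a) (h1 : a < 0) :
    pvInv N (pvFindRoot roots a).1 ∧ (pvFindRoot roots a).2 = pvRootOf roots (a + N) ∧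
      ∀ x : Int, 0 ≤ x → x < (N : Int) → pvRootOf (pvFindRoot roots a).1 x = pvRootOf roots x := by
  have hlen : roots.length = N := h.1.1
  have hN1 : 1 ≤ N := by omega
  have ha0 : 0 ≤ a + N := by omega
  have ha1 : a + N < (N : Int) := by omega
  have hwrap : pvGetI roots a = pvGetI roots (a + N) := pvGetD_wrap roots hlen 0 h0 h1
  have hw := pvStep_bound h.1 ha0 ha1
  have hne : a ≠ pvGetI roots a := by
    rw [hwrap]
    show a ≠ pvStep roots (a + N)
    omega
  simp only [pvFindRoot, if_neg hne]
  have hchase1 : pvChase (roots.length + 1) roots a [] =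
      pvChase roots.length roots (pvGetI roots (a + N)) [a] := by
    simp only [pvChase, if_neg hne, List.nil_append]
    rw [hwrap]
  have hfixN : pvStep roots ((pvStep roots)^[roots.length - 1] (pvGetI roots (a + N))) =
      (pvStep roots)^[roots.length - 1] (pvGetI roots (a + N)) := by
    have hs : (pvStep roots)^[roots.length - 1] (pvGetI roots (a + N)) =
        (pvStep roots)^[roots.length] (a + N) := by
      show (pvStep roots)^[roots.length - 1] (pvStep roots (a + N)) = _
      rw [← Function.iterate_succ_apply]
      congr 1
      omega
    rw [hs]
    exact pvRootOf_fix h ha0 ha1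
  obtain ⟨hch1, suf, hsuf, hall⟩ := pvChase_spec h roots.length (roots.length - 1)
    (pvGetI roots (a + N)) [a] (by omega) hw.1 hw.2 hfixN
  have hrs : pvRootOf roots (pvGetI roots (a + N)) = pvRootOf roots (a + N) :=
    pvRootOf_step h ha0 ha1
  rw [hchase1, hch1, hsuf, hrs]
  simp only [List.singleton_append, List.foldl_cons]
  -- the first compressed cell is the negative index a, which wraps to a + N
  have hset1 : PySem.List.pySetD roots a (pvRootOf roots (a + N)) =
      PySem.List.pySetD roots (a + N) (pvRootOf roots (a + N)) :=
    pvSetD_wrap roots hlen _ h0 h1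
  rw [hset1]
  obtain ⟨hinv1, hpres1⟩ := pvSet_root h ha0 ha1
  have hres := pvCompress (r := pvRootOf roots (a + N)) suf _ hinv1 hpres1
    (fun s hs => by
      obtain ⟨q0, q1, q2⟩ := hall s hs
      exact ⟨q0, q1, by rw [q2, hrs]⟩)
  refine ⟨hres.1, trivial, ?_⟩
  intro x hx0 hx1
  rw [hres.2 x hx0 hx1]

-- ---------- the graph and its components ----------
-- ---------- the graph and its components ----------

def pvE (grid : List (List Int)) (N : Nat) (u v : Int) : Prop :=
  u ≠ v ∧ 0 ≤ u ∧ u < (N : Int) ∧ 0 ≤ v ∧ v < (N : Int) ∧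
    pvEntry grid (min u v) (max u v) ≠ 0

def pvEp (grid : List (List Int)) (N : Nat) (ps : List (Int × Int)) (u v : Int) : Prop :=
  ((u, v) ∈ ps ∨ (v, u) ∈ ps) ∧ pvE grid N u v

def pvConn (grid : List (List Int)) (N : Nat) (ps : List (Int × Int)) : Int → Int → Prop :=
  Relation.ReflTransGen (pvEp grid N ps)

theorem pvE_symm (grid : List (List Int)) (N : Nat) : Symmetric (pvE grid N) := by
  rintro u v ⟨hne, h1, h2, h3, h4, h5⟩
  exact ⟨hne.symm, h3, h4, h1, h2, by rwa [min_comm, max_comm]⟩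

theorem pvEp_symm (grid : List (List Int)) (N : Nat) (ps : List (Int × Int)) :
    Symmetric (pvEp grid N ps) := by
  rintro u v ⟨hm, hE⟩
  exact ⟨hm.symm, pvE_symm grid N hE⟩

def pvFullInv (grid : List (List Int)) (N : Nat) (ps : List (Int × Int)) (roots : List Int) : Prop :=
  pvInv N roots ∧
    ∀ x y : Int, 0 ≤ x → x < (N : Int) → 0 ≤ y → y < (N : Int) →
      (pvRootOf roots x = pvRootOf roots y ↔ pvConn grid N ps x y)

theorem pvConn_nil {grid : List (List Int)} {N : Nat} {x y : Int} :
    pvConn grid N [] x y ↔ x = y := by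
  constructor
  · intro h
    induction h with
    | refl => rfl
    | tail _ hstep ih => rcases hstep.1 with h | h <;> simp at h
  · rintro rfl; exact Relation.ReflTransGen.refl

theorem pvBase (grid : List (List Int)) (N : Nat) :
    pvFullInv grid N [] (PySem.List.pyRange 0 (N : Int) 1) := by
  have hlen : (PySem.List.pyRange 0 (N : Int) 1).length = N := by
    rw [PySem.List.length_pyRange_one]; omega
  have hstep : ∀ i : Int, 0 ≤ i → i < (N : Int) →
      pvStep (PySem.List.pyRange 0 (N : Int) 1) i = i := by
    intro i h0 h1
    show pvGetI _ i = i
    unfold pvGetI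
    rw [PySem.List.pyGetD_eq_getElem _ 0 h0 (by omega)]
    rw [PySem.List.getElem_pyRange_one]
    omega
  have hroot : ∀ i : Int, 0 ≤ i → i < (N : Int) →
      pvRootOf (PySem.List.pyRange 0 (N : Int) 1) i = i := by
    intro i h0 h1
    unfold pvRootOf
    exact pvIter_fix (hstep i h0 h1) _
  have hinv : pvInv N (PySem.List.pyRange 0 (N : Int) 1) := by
    refine ⟨⟨hlen, ?_⟩, ?_⟩
    · intro v hv
      have := PySem.List.mem_pyRange_one.mp hv
      omega
    · intro i h0 h1
      exact ⟨0, by simpa using hstep i h0 h1⟩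
  refine ⟨hinv, ?_⟩
  intro x y hx0 hx1 hy0 hy1
  rw [hroot x hx0 hx1, hroot y hy0 hy1, pvConn_nil]

theorem pvUnion_step {grid : List (List Int)} {N : Nat} {ps : List (Int × Int)} {roots : List Int}
    (h : pvFullInv grid N ps roots) {a b : Int} (ha : 0 ≤ a) (hab : a < b) (hb : b < (N : Int)) :
    pvFullInv grid N (ps ++ [(a, b)]) (pvUnion grid roots a b) := by
  obtain ⟨hinv, hiff⟩ := h
  have ha1 : a < (N : Int) := lt_trans hab hb
  have hb0 : 0 ≤ b := le_trans ha (le_of_lt hab)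
  have hminab : min a b = a := min_eq_left (le_of_lt hab)
  have hmaxab : max a b = b := max_eq_right (le_of_lt hab)
  by_cases hentry : pvEntry grid a b = 0
  · have hEp : ∀ u v : Int, pvEp grid N (ps ++ [(a, b)]) u v ↔ pvEp grid N ps u v := by
      intro u v
      unfold pvEp
      constructor
      · rintro ⟨hm | hm, hE⟩
        · rcases List.mem_append.mp hm with hm | hm
          · exact ⟨Or.inl hm, hE⟩
          · simp only [List.mem_singleton, Prod.mk.injEq] at hm
            obtain ⟨rfl, rfl⟩ := hm
            have hcontr := hE.2.2.2.2.2
            rw [hminab, hmaxab] at hcontr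
            exact absurd hentry hcontr
        · rcases List.mem_append.mp hm with hm | hm
          · exact ⟨Or.inr hm, hE⟩
          · simp only [List.mem_singleton, Prod.mk.injEq] at hm
            obtain ⟨rfl, rfl⟩ := hm
            have := hE.2.2.2.2.2
            rw [min_comm, max_comm, hminab, hmaxab] at this
            exact absurd hentry this
      · rintro ⟨hm, hE⟩
        exact ⟨hm.imp (List.mem_append_left _) (List.mem_append_left _), hE⟩
    unfold pvUnion
    rw [if_pos hentry]
    refine ⟨hinv, ?_⟩
    intro x y hx0 hx1 hy0 hy1
    rw [hiff x y hx0 hx1 hy0 hy1]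
    exact (pvRtg_congr hEp).symm
  · have hEab : pvE grid N a b :=
      ⟨ne_of_lt hab, ha, ha1, hb0, hb, by rwa [hminab, hmaxab]⟩
    have hEp : ∀ u v : Int, pvEp grid N (ps ++ [(a, b)]) u v ↔
        (pvEp grid N ps u v ∨ (u = a ∧ v = b) ∨ (u = b ∧ v = a)) := by
      intro u v
      unfold pvEp
      constructor
      · rintro ⟨hm | hm, hE⟩
        · rcases List.mem_append.mp hm with hm | hm
          · exact Or.inl ⟨Or.inl hm, hE⟩
          · simp only [List.mem_singleton, Prod.mk.injEq] at hm
            exact Or.inr (Or.inl hm)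
        · rcases List.mem_append.mp hm with hm | hm
          · exact Or.inl ⟨Or.inr hm, hE⟩
          · simp only [List.mem_singleton, Prod.mk.injEq] at hm
            exact Or.inr (Or.inr ⟨hm.2, hm.1⟩)
      · rintro (⟨hm, hE⟩ | ⟨rfl, rfl⟩ | ⟨rfl, rfl⟩)
        · exact ⟨hm.imp (List.mem_append_left _) (List.mem_append_left _), hE⟩
        · exact ⟨Or.inl (List.mem_append_right _ List.mem_cons_self), hEab⟩
        · exact ⟨Or.inr (List.mem_append_right _ List.mem_cons_self), pvE_symm grid N hEab⟩
    have hconn' : ∀ x y : Int, pvConn grid N (ps ++ [(a, b)]) x y ↔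
        (pvConn grid N ps x y ∨
          (pvConn grid N ps x a ∧ pvConn grid N ps b y) ∨
          (pvConn grid N ps x b ∧ pvConn grid N ps a y)) := by
      intro x y
      unfold pvConn
      rw [pvRtg_congr hEp]
      exact pvRtg_pair (pvEp_symm grid N ps) a b x y
    have hfa := pvFindRoot_spec hinv ha ha1
    have hfb := pvFindRoot_spec hfa.1 hb0 hb
    unfold pvUnion
    rw [if_neg hentry]
    set roots1 := (pvFindRoot roots a).1 with hroots1
    set ra := (pvFindRoot roots a).2 with hradef
    set roots2 := (pvFindRoot roots1 b).1 with hroots2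
    set rb := (pvFindRoot roots1 b).2 with hrbdef
    have hra : ra = pvRootOf roots a := hfa.2.1
    have hrb : rb = pvRootOf roots b := by
      rw [hfb.2.1, hfa.2.2 b hb0 hb]
    have hpres2 : ∀ x : Int, 0 ≤ x → x < (N : Int) →
        pvRootOf roots2 x = pvRootOf roots x := by
      intro x h0 h1
      rw [hfb.2.2 x h0 h1, hfa.2.2 x h0 h1]
    have hsym : Symmetric (pvConn grid N ps) :=
      Relation.ReflTransGen.symmetric (pvEp_symm grid N ps)
    by_cases heq : ra = rb
    · rw [if_pos heq]
      have hconnab : pvConn grid N ps a b := by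
        rw [← hiff a b ha ha1 hb0 hb, ← hra, ← hrb]; exact heq
      refine ⟨hfb.1, ?_⟩
      intro x y hx0 hx1 hy0 hy1
      rw [hpres2 x hx0 hx1, hpres2 y hy0 hy1, hiff x y hx0 hx1 hy0 hy1, hconn' x y]
      constructor
      · exact Or.inl
      · rintro (h | ⟨h1, h2⟩ | ⟨h1, h2⟩)
        · exact h
        · exact (h1.trans hconnab).trans h2
        · exact (h1.trans (hsym hconnab)).trans h2
    · rw [if_neg heq]
      have hrab := pvRootOf_bound hinv.1 ha ha1
      have hrbb := pvRootOf_bound hinv.1 hb0 hb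
      have hfixra : pvStep roots2 ra = ra := by
        have : ra = pvRootOf roots2 a := by rw [hpres2 a ha ha1, hra]
        rw [this]
        exact pvRootOf_fix hfb.1 ha ha1
      have hfixrb : pvStep roots2 rb = rb := by
        have : rb = pvRootOf roots2 b := by rw [hpres2 b hb0 hb, hrb]
        rw [this]
        exact pvRootOf_fix hfb.1 hb0 hb
      have hrbeq : pvRootOf roots2 b = rb := by rw [hpres2 b hb0 hb, hrb]
      obtain ⟨hinv3, hroot3⟩ := pvSet_union hfb.1 hb0 hb
        (hra ▸ hrab.1) (hra ▸ hrab.2) (hrb ▸ hrbb.1) (hrb ▸ hrbb.2)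
        hfixra hfixrb hrbeq heq
      refine ⟨hinv3, ?_⟩
      intro x y hx0 hx1 hy0 hy1
      rw [hroot3 x hx0 hx1, hroot3 y hy0 hy1, hpres2 x hx0 hx1, hpres2 y hy0 hy1, hconn' x y]
      rw [← hiff x y hx0 hx1 hy0 hy1]
      rw [show pvConn grid N ps x a ↔ pvRootOf roots x = pvRootOf roots a from
        (hiff x a hx0 hx1 ha ha1).symm]
      rw [show pvConn grid N ps b y ↔ pvRootOf roots b = pvRootOf roots y from
        (hiff b y hb0 hb hy0 hy1).symm]
      rw [show pvConn grid N ps x b ↔ pvRootOf roots x = pvRootOf roots b from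
        (hiff x b hx0 hx1 hb0 hb).symm]
      rw [show pvConn grid N ps a y ↔ pvRootOf roots a = pvRootOf roots y from
        (hiff a y ha ha1 hy0 hy1).symm]
      rw [← hra, ← hrb]
      split_ifs with h1 h2 h2 <;> constructor <;> intro hh <;> omega

def pvPairs (N : Nat) : List (Int × Int) :=
  (PySem.List.pyRange 0 (N : Int) 1).flatMap
    (fun a => (PySem.List.pyRange (a + 1) (N : Int) 1).map (fun b => (a, b)))

theorem pvMem_pairs {N : Nat} {a b : Int} :
    (a, b) ∈ pvPairs N ↔ 0 ≤ a ∧ a < b ∧ b < (N : Int) := by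
  unfold pvPairs
  simp only [List.mem_flatMap, List.mem_map, Prod.mk.injEq]
  constructor
  · rintro ⟨a', ha', b', hb', rfl, rfl⟩
    have h1 := PySem.List.mem_pyRange_one.mp ha'
    have h2 := PySem.List.mem_pyRange_one.mp hb'
    omega
  · rintro ⟨h0, h1, h2⟩
    exact ⟨a, PySem.List.mem_pyRange_one.mpr (by omega), b,
      PySem.List.mem_pyRange_one.mpr (by omega), rfl, rfl⟩

theorem pvDsu_inv (grid : List (List Int)) (N : Nat) :
    pvFullInv grid N (pvPairs N)
      ((PySem.List.pyRange 0 (N : Int) 1).foldl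
        (fun roots a =>
          (PySem.List.pyRange (a + 1) (N : Int) 1).foldl (fun r b => pvUnion grid r a b) roots)
        (PySem.List.pyRange 0 (N : Int) 1)) := by
  have hfold : ∀ (l : List (Int × Int)) (ps : List (Int × Int)) (roots : List Int),
      pvFullInv grid N ps roots →
      (∀ p ∈ l, 0 ≤ p.1 ∧ p.1 < p.2 ∧ p.2 < (N : Int)) →
      pvFullInv grid N (ps ++ l) (l.foldl (fun r p => pvUnion grid r p.1 p.2) roots) := by
    intro l
    induction l with
    | nil => intro ps roots h _; simpa using h
    | cons p t ih =>
      intro ps roots h hall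
      obtain ⟨h0, h1, h2⟩ := hall p List.mem_cons_self
      have hstep := pvUnion_step h h0 h1 h2
      have := ih (ps ++ [(p.1, p.2)]) _ hstep
        (fun q hq => hall q (List.mem_cons_of_mem _ hq))
      simpa [List.append_assoc] using this
  have hmem : ∀ p ∈ pvPairs N, 0 ≤ p.1 ∧ p.1 < p.2 ∧ p.2 < (N : Int) := by
    intro p hp
    exact (pvMem_pairs (N := N) (a := p.1) (b := p.2)).mp hp
  have hmain := hfold (pvPairs N) [] (PySem.List.pyRange 0 (N : Int) 1) (pvBase grid N) hmem
  simp only [List.nil_append] at hmain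
  have hrw : (PySem.List.pyRange 0 (N : Int) 1).foldl
      (fun roots a =>
        (PySem.List.pyRange (a + 1) (N : Int) 1).foldl (fun r b => pvUnion grid r a b) roots)
      (PySem.List.pyRange 0 (N : Int) 1) =
      (pvPairs N).foldl (fun r p => pvUnion grid r p.1 p.2) (PySem.List.pyRange 0 (N : Int) 1) := by
    unfold pvPairs
    rw [List.foldl_flatMap]
    simp only [List.foldl_map]
  rw [hrw]
  exact hmain

theorem pvEp_pairs (grid : List (List Int)) (N : Nat) (u v : Int) :
    pvEp grid N (pvPairs N) u v ↔ pvE grid N u v := by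
  constructor
  · exact fun h => h.2
  · intro hE
    refine ⟨?_, hE⟩
    obtain ⟨hne, hu0, hu1, hv0, hv1, _⟩ := hE
    rcases lt_or_gt_of_ne hne with hlt | hgt
    · exact Or.inl (pvMem_pairs.mpr ⟨hu0, hlt, hv1⟩)
    · exact Or.inr (pvMem_pairs.mpr ⟨hv0, hgt, hu1⟩)

-- ---------- B-side: flood fill computes the component of the start city ----------

def pvVis (V : List Bool) (c : Int) : Prop := PySem.List.pyGetD V c false = true

def pvUnvis (N : Nat) (vis : List Bool) : Nat :=
  ((PySem.List.pyRange 0 (N : Int) 1).filter (fun v => !(PySem.List.pyGetD vis v false))).length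

-- one cell update of any list, seen through Python indexing
theorem pvSet_getG {α : Type} {xs : List α} {N : Nat} (hlen : xs.length = N) {s i : Int}
    (v d : α) (hs0 : 0 ≤ s) (hs1 : s < (N : Int)) (hi0 : 0 ≤ i) (hi1 : i < (N : Int)) :
    PySem.List.pyGetD (PySem.List.pySetD xs s v) i d =
      if i = s then v else PySem.List.pyGetD xs i d := by
  have hset : PySem.List.pySetD xs s v = xs.set s.toNat v :=
    PySem.List.pySetD_of_nonneg xs v hs0
  have hll : (xs.set s.toNat v).length = xs.length := by simp
  rw [hset, PySem.List.pyGetD_eq_getElem (xs.set s.toNat v) d hi0 (by omega),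
    PySem.List.pyGetD_eq_getElem xs d hi0 (by omega)]
  rw [List.getElem_set]
  by_cases he : i = s
  · subst he; simp
  · have hne : s.toNat ≠ i.toNat := by omega
    simp [hne, he]

theorem pvUnvis_add {N : Nat} {vis : List Bool} {v : Int} (hlen : vis.length = N)
    (hv : v ∈ PySem.List.pyRange 0 (N : Int) 1)
    (hfalse : PySem.List.pyGetD vis v false = false) :
    pvUnvis N (PySem.List.pySetD vis v true) + 1 = pvUnvis N vis := by
  unfold pvUnvis
  obtain ⟨hv0, hv1⟩ := PySem.List.mem_pyRange_one.mp hv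
  have hcong : ∀ x ∈ PySem.List.pyRange 0 (N : Int) 1,
      (!(PySem.List.pyGetD (PySem.List.pySetD vis v true) x false)) =
        ((x != v) && !(PySem.List.pyGetD vis x false)) := by
    intro x hx
    obtain ⟨hx0, hx1⟩ := PySem.List.mem_pyRange_one.mp hx
    rw [pvSet_getG hlen true false hv0 hv1 hx0 hx1]
    by_cases he : x = v
    · simp [he]
    · simp [he]
  rw [List.filter_congr hcong, ← List.filter_filter]
  have hnd : ((PySem.List.pyRange 0 (N : Int) 1).filter
      (fun x => !(PySem.List.pyGetD vis x false))).Nodup :=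
    (PySem.List.nodup_pyRange_one 0 (N : Int)).filter _
  have hvmem : v ∈ (PySem.List.pyRange 0 (N : Int) 1).filter
      (fun x => !(PySem.List.pyGetD vis x false)) := by
    rw [List.mem_filter]
    exact ⟨hv, by simp [hfalse]⟩
  rw [← List.Nodup.erase_eq_filter hnd v, List.length_erase_of_mem hvmem]
  have := List.length_pos_of_mem hvmem
  omega

theorem pvScan_spec {grid : List (List Int)} {N : Nat} {u : Int} :
    ∀ (l : List Int) (vis : List Bool) (st : List Int),
      (∀ v ∈ l, v ∈ PySem.List.pyRange 0 (N : Int) 1) → vis.length = N →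
      (l.foldl (fun vs v =>
          if PySem.List.pyGetD vs.1 v false = false ∧ pvCell grid u v ≠ 0
          then (PySem.List.pySetD vs.1 v true, vs.2 ++ [v]) else vs)
        (vis, st)).1.length = N ∧
      (∀ c : Int, 0 ≤ c → c < (N : Int) → pvVis vis c → pvVis (l.foldl (fun vs v =>
          if PySem.List.pyGetD vs.1 v false = false ∧ pvCell grid u v ≠ 0
          then (PySem.List.pySetD vs.1 v true, vs.2 ++ [v]) else vs)
        (vis, st)).1 c) ∧
      (∀ c : Int, 0 ≤ c → c < (N : Int) → pvVis (l.foldl (fun vs v =>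
          if PySem.List.pyGetD vs.1 v false = false ∧ pvCell grid u v ≠ 0
          then (PySem.List.pySetD vs.1 v true, vs.2 ++ [v]) else vs)
        (vis, st)).1 c → pvVis vis c ∨
          (PySem.List.pyGetD vis c false = false ∧ c ∈ l ∧ pvCell grid u c ≠ 0)) ∧
      (∀ v ∈ l, pvCell grid u v ≠ 0 → pvVis (l.foldl (fun vs v =>
          if PySem.List.pyGetD vs.1 v false = false ∧ pvCell grid u v ≠ 0
          then (PySem.List.pySetD vs.1 v true, vs.2 ++ [v]) else vs)
        (vis, st)).1 v) ∧
      (∀ c ∈ (l.foldl (fun vs v =>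
          if PySem.List.pyGetD vs.1 v false = false ∧ pvCell grid u v ≠ 0
          then (PySem.List.pySetD vs.1 v true, vs.2 ++ [v]) else vs)
        (vis, st)).2, c ∈ st ∨ (0 ≤ c ∧ c < (N : Int) ∧ pvVis (l.foldl (fun vs v =>
          if PySem.List.pyGetD vs.1 v false = false ∧ pvCell grid u v ≠ 0
          then (PySem.List.pySetD vs.1 v true, vs.2 ++ [v]) else vs)
        (vis, st)).1 c)) ∧
      (∀ c ∈ st, c ∈ (l.foldl (fun vs v =>
          if PySem.List.pyGetD vs.1 v false = false ∧ pvCell grid u v ≠ 0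
          then (PySem.List.pySetD vs.1 v true, vs.2 ++ [v]) else vs)
        (vis, st)).2) ∧
      (∀ c : Int, 0 ≤ c → c < (N : Int) → pvVis (l.foldl (fun vs v =>
          if PySem.List.pyGetD vs.1 v false = false ∧ pvCell grid u v ≠ 0
          then (PySem.List.pySetD vs.1 v true, vs.2 ++ [v]) else vs)
        (vis, st)).1 c → pvVis vis c ∨ c ∈ (l.foldl (fun vs v =>
          if PySem.List.pyGetD vs.1 v false = false ∧ pvCell grid u v ≠ 0
          then (PySem.List.pySetD vs.1 v true, vs.2 ++ [v]) else vs)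
        (vis, st)).2) ∧
      ((l.foldl (fun vs v =>
          if PySem.List.pyGetD vs.1 v false = false ∧ pvCell grid u v ≠ 0
          then (PySem.List.pySetD vs.1 v true, vs.2 ++ [v]) else vs)
        (vis, st)).2.length + pvUnvis N (l.foldl (fun vs v =>
          if PySem.List.pyGetD vs.1 v false = false ∧ pvCell grid u v ≠ 0
          then (PySem.List.pySetD vs.1 v true, vs.2 ++ [v]) else vs)
        (vis, st)).1 = st.length + pvUnvis N vis) := by
  intro l
  induction l with
  | nil =>
    intro vis st _ hlen
    simp only [List.foldl_nil]
    refine ⟨hlen, fun c _ _ hc => hc, fun c _ _ hc => Or.inl hc, ?_,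
      fun c hc => Or.inl hc, fun c hc => hc, fun c _ _ hc => Or.inl hc, trivial⟩
    intro v hv
    simp at hv
  | cons v t ih =>
    intro vis st hl hlen
    simp only [List.foldl_cons]
    have hvr : v ∈ PySem.List.pyRange 0 (N : Int) 1 := hl v List.mem_cons_self
    obtain ⟨hv0, hv1⟩ := PySem.List.mem_pyRange_one.mp hvr
    by_cases hcond : PySem.List.pyGetD vis v false = false ∧ pvCell grid u v ≠ 0
    · rw [if_pos hcond]
      have hlen2 : (PySem.List.pySetD vis v true).length = N := by
        rw [PySem.List.length_pySetD]; exact hlen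
      have hform : ∀ c : Int, 0 ≤ c → c < (N : Int) →
          PySem.List.pyGetD (PySem.List.pySetD vis v true) c false =
            if c = v then true else PySem.List.pyGetD vis c false := by
        intro c hc0 hc1
        exact pvSet_getG hlen true false hv0 hv1 hc0 hc1
      obtain ⟨o0, o1, o3, o4, o5, o6, o7, o8⟩ :=
        ih (PySem.List.pySetD vis v true) (st ++ [v])
          (fun w hw => hl w (List.mem_cons_of_mem _ hw)) hlen2
      have hvis2v : pvVis (PySem.List.pySetD vis v true) v := by
        unfold pvVis
        rw [hform v hv0 hv1, if_pos rfl]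
      refine ⟨o0, ?_, ?_, ?_, ?_, ?_, ?_, ?_⟩
      · intro c hc0 hc1 hc
        refine o1 c hc0 hc1 ?_
        unfold pvVis at hc ⊢
        rw [hform c hc0 hc1]
        by_cases he : c = v
        · rw [if_pos he]
        · rw [if_neg he]; exact hc
      · intro c hc0 hc1 hc
        rcases o3 c hc0 hc1 hc with hc2 | ⟨hc2, hc3, hc4⟩
        · unfold pvVis at hc2
          rw [hform c hc0 hc1] at hc2
          by_cases he : c = v
          · subst he
            exact Or.inr ⟨hcond.1, List.mem_cons_self, hcond.2⟩
          · rw [if_neg he] at hc2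
            exact Or.inl hc2
        · rw [hform c hc0 hc1] at hc2
          by_cases he : c = v
          · rw [if_pos he] at hc2; simp at hc2
          · rw [if_neg he] at hc2
            exact Or.inr ⟨hc2, List.mem_cons_of_mem _ hc3, hc4⟩
      · intro w hw hcell
        rcases List.mem_cons.mp hw with rfl | hw2
        · exact o1 w hv0 hv1 hvis2v
        · exact o4 w hw2 hcell
      · intro c hc
        rcases o5 c hc with hc1 | hc1
        · rcases List.mem_append.mp hc1 with hc2 | hc2
          · exact Or.inl hc2
          · simp only [List.mem_singleton] at hc2
            subst hc2
            exact Or.inr ⟨hv0, hv1, o1 c hv0 hv1 hvis2v⟩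
        · exact Or.inr hc1
      · intro c hc
        exact o6 c (List.mem_append_left _ hc)
      · intro c hc0 hc1 hc
        rcases o7 c hc0 hc1 hc with hc2 | hc2
        · unfold pvVis at hc2
          rw [hform c hc0 hc1] at hc2
          by_cases he : c = v
          · subst he
            exact Or.inr (o6 c (List.mem_append_right _ List.mem_cons_self))
          · rw [if_neg he] at hc2
            exact Or.inl hc2
        · exact Or.inr hc2
      · rw [o8]
        have := pvUnvis_add hlen hvr hcond.1
        simp only [List.length_append, List.length_singleton]
        omega
    · rw [if_neg hcond]
      obtain ⟨o0, o1, o3, o4, o5, o6, o7, o8⟩ :=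
        ih vis st (fun w hw => hl w (List.mem_cons_of_mem _ hw)) hlen
      refine ⟨o0, o1, ?_, ?_, o5, o6, o7, o8⟩
      · intro c hc0 hc1 hc
        rcases o3 c hc0 hc1 hc with hc2 | ⟨hc2, hc3, hc4⟩
        · exact Or.inl hc2
        · exact Or.inr ⟨hc2, List.mem_cons_of_mem _ hc3, hc4⟩
      · intro w hw hcell
        rcases List.mem_cons.mp hw with rfl | hw2
        · by_cases hwv : PySem.List.pyGetD vis w false = false
          · exact absurd ⟨hwv, hcell⟩ hcond
          · exact o1 w hv0 hv1 (by simpa [pvVis] using hwv)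
        · exact o4 w hw2 hcell

def pvGood (grid : List (List Int)) (N : Nat) (p0 : Int) (vis : List Bool) (stack : List Int) : Prop :=
  vis.length = N ∧ (0 ≤ p0 ∧ p0 < (N : Int)) ∧ pvVis vis p0 ∧
    (∀ c : Int, 0 ≤ c → c < (N : Int) → pvVis vis c →
      Relation.ReflTransGen (pvE grid N) p0 c) ∧
    (∀ u ∈ stack, 0 ≤ u ∧ u < (N : Int) ∧ pvVis vis u) ∧
    (∀ u : Int, 0 ≤ u → u < (N : Int) → pvVis vis u →
      ∀ v : Int, pvE grid N u v → pvVis vis v ∨ u ∈ stack)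

theorem pvVisit_spec {grid : List (List Int)} {N : Nat} {p0 u : Int} {vis : List Bool}
    {rest : List Int} (hg : pvGood grid N p0 vis (rest ++ [u])) :
    pvGood grid N p0 (pvVisit grid (N : Int) u (vis, rest)).1 (pvVisit grid (N : Int) u (vis, rest)).2 ∧
      (pvVisit grid (N : Int) u (vis, rest)).2.length +
          pvUnvis N (pvVisit grid (N : Int) u (vis, rest)).1 + 1 =
        (rest ++ [u]).length + pvUnvis N vis := by
  obtain ⟨hlen, hp0b, hp0, hreach, hstk, hfr⟩ := hg
  obtain ⟨hu0, hu1, huv⟩ := hstk u (List.mem_append_right _ List.mem_cons_self)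
  obtain ⟨o0, o1, o3, o4, o5, o6, o7, o8⟩ :=
    pvScan_spec (grid := grid) (N := N) (u := u) (PySem.List.pyRange 0 (N : Int) 1) vis rest
      (fun v hv => hv) hlen
  unfold pvVisit
  refine ⟨⟨o0, hp0b, o1 p0 hp0b.1 hp0b.2 hp0, ?_, ?_, ?_⟩, ?_⟩
  · intro c hc0 hc1 hc
    rcases o3 c hc0 hc1 hc with hc2 | ⟨hc2, _, hc4⟩
    · exact hreach c hc0 hc1 hc2
    · have hE : pvE grid N u c :=
        ⟨(fun he => by rw [he] at huv; unfold pvVis at huv; rw [huv] at hc2; cases hc2),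
          hu0, hu1, hc0, hc1, hc4⟩
      exact (hreach u hu0 hu1 huv).tail hE
  · intro c hc
    rcases o5 c hc with hc1 | hc1
    · obtain ⟨h1, h2, h3⟩ := hstk c (List.mem_append_left _ hc1)
      exact ⟨h1, h2, o1 c h1 h2 h3⟩
    · exact hc1
  · intro w hw0 hw1 hw v hE
    by_cases hwu : w = u
    · subst hwu
      have hvr : v ∈ PySem.List.pyRange 0 (N : Int) 1 :=
        PySem.List.mem_pyRange_one.mpr ⟨hE.2.2.2.1, hE.2.2.2.2.1⟩
      exact Or.inl (o4 v hvr hE.2.2.2.2.2)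
    · rcases o7 w hw0 hw1 hw with hw2 | hw2
      · rcases hfr w hw0 hw1 hw2 v hE with hv1 | hw3
        · exact Or.inl (o1 v hE.2.2.2.1 hE.2.2.2.2.1 hv1)
        · rcases List.mem_append.mp hw3 with hw4 | hw4
          · exact Or.inr (o6 w hw4)
          · simp only [List.mem_singleton] at hw4
            exact absurd hw4 hwu
      · exact Or.inr hw2
  · have : (rest ++ [u]).length = rest.length + 1 := by simp
    omega

theorem pvFlood_spec {grid : List (List Int)} {N : Nat} {p0 : Int} :
    ∀ (fuel : Nat) (vis : List Bool) (stack : List Int), pvGood grid N p0 vis stack →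
      stack.length + pvUnvis N vis ≤ fuel →
      (pvFlood grid (N : Int) fuel vis stack).length = N ∧
      (∀ c : Int, 0 ≤ c → c < (N : Int) → pvVis vis c →
        pvVis (pvFlood grid (N : Int) fuel vis stack) c) ∧
        (∀ c : Int, 0 ≤ c → c < (N : Int) → pvVis (pvFlood grid (N : Int) fuel vis stack) c →
          Relation.ReflTransGen (pvE grid N) p0 c) ∧
        (∀ u v : Int, pvVis (pvFlood grid (N : Int) fuel vis stack) u → pvE grid N u v →
          pvVis (pvFlood grid (N : Int) fuel vis stack) v) := by
  intro fuel
  induction fuel with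
  | zero =>
    intro vis stack hg hm
    have hstack : stack = [] := List.length_eq_zero_iff.mp (by omega)
    subst hstack
    simp only [pvFlood]
    refine ⟨hg.1, fun c _ _ hc => hc, fun c hc0 hc1 hc => hg.2.2.2.1 c hc0 hc1 hc, ?_⟩
    intro u v hu hE
    rcases hg.2.2.2.2.2 u hE.2.1 hE.2.2.1 hu v hE with hv | hu1
    · exact hv
    · simp at hu1
  | succ fuel ih =>
    intro vis stack hg hm
    rcases List.eq_nil_or_concat stack with rfl | ⟨rest, u, hstack⟩
    · have hpop : PySem.List.pop? ([] : List Int) (-1) = none := rfl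
      simp only [pvFlood, hpop]
      refine ⟨hg.1, fun c _ _ hc => hc, fun c hc0 hc1 hc => hg.2.2.2.1 c hc0 hc1 hc, ?_⟩
      intro u v hu hE
      rcases hg.2.2.2.2.2 u hE.2.1 hE.2.2.1 hu v hE with hv | hu1
      · exact hv
      · simp at hu1
    · rw [List.concat_eq_append] at hstack
      subst hstack
      have hpop : PySem.List.pop? (rest ++ [u]) (-1) = some (u, rest) :=
        PySem.List.pop?_last rest u
      simp only [pvFlood, hpop]
      obtain ⟨hg2, hmeas⟩ := pvVisit_spec (p0 := p0) hg
      have hm2 : (pvVisit grid (N : Int) u (vis, rest)).2.length +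
          pvUnvis N (pvVisit grid (N : Int) u (vis, rest)).1 ≤ fuel := by
        have : (rest ++ [u]).length = rest.length + 1 := by simp
        omega
      obtain ⟨i0, i1, i2, i3⟩ := ih _ _ hg2 hm2
      refine ⟨i0, ?_, i2, i3⟩
      intro c hc0 hc1 hc
      refine i1 c hc0 hc1 ?_
      obtain ⟨o0, o1, _⟩ := pvScan_spec (grid := grid) (N := N) (u := u)
        (PySem.List.pyRange 0 (N : Int) 1) vis rest (fun v hv => hv) hg.1
      exact o1 c hc0 hc1 hc

theorem pvReach_mem {grid : List (List Int)} {N : Nat} {p0 c : Int} {V : List Bool}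
    (hp : pvVis V p0) (hcl : ∀ u v : Int, pvVis V u → pvE grid N u v → pvVis V v)
    (h : Relation.ReflTransGen (pvE grid N) p0 c) : pvVis V c := by
  induction h with
  | refl => exact hp
  | tail _ hstep ih => exact hcl _ _ ih hstep

-- ---------- the two check loops agree ----------

theorem pvCheckA_eq {N : Nat} {V : List Bool} {r0 : Int} (hVlen : V.length = N) :
    ∀ (rest : List Int) (roots : List Int), pvInv N roots →
      (∀ p ∈ rest, -(N : Int) ≤ p ∧ p < (N : Int)) →
      (∀ q : Int, 0 ≤ q → q < (N : Int) → (pvRootOf roots q = r0 ↔ pvVis V q)) →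
      pvCheckA r0 roots rest =
        (if rest.all (fun c => PySem.List.pyGetD V c false) then "YES" else "NO") := by
  intro rest
  induction rest with
  | nil => intro roots _ _ _; rfl
  | cons p t ih =>
    intro roots hinv hb hroots
    obtain ⟨hp0, hp1⟩ := hb p List.mem_cons_self
    by_cases hneg : 0 ≤ p
    · have hf := pvFindRoot_spec hinv hneg hp1
      simp only [pvCheckA, List.all_cons]
      by_cases hmem : pvVis V p
      · have heq : pvRootOf roots p = r0 := (hroots p hneg hp1).mpr hmem
        rw [if_neg (by rw [hf.2.1, heq]; simp)]
        unfold pvVis at hmem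
        simp only [hmem, Bool.true_and]
        exact ih _ hf.1 (fun q hq => hb q (List.mem_cons_of_mem _ hq))
          (fun q hq0 hq1 => by rw [hf.2.2 q hq0 hq1]; exact hroots q hq0 hq1)
      · have hne2 : pvRootOf roots p ≠ r0 := fun he => hmem ((hroots p hneg hp1).mp he)
        rw [if_pos (by rw [hf.2.1]; exact fun he => hne2 he.symm)]
        have hfalse : PySem.List.pyGetD V p false = false := by
          unfold pvVis at hmem
          simpa using hmem
        simp [hfalse]
    · have hpneg : p < 0 := by omega
      have hf := pvFindRoot_neg hinv hp0 hpneg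
      have hq0 : 0 ≤ p + (N : Int) := by omega
      have hq1 : p + (N : Int) < (N : Int) := by omega
      have hgw : PySem.List.pyGetD V p false = PySem.List.pyGetD V (p + N) false :=
        pvGetD_wrap V hVlen false hp0 hpneg
      simp only [pvCheckA, List.all_cons]
      by_cases hmem : pvVis V (p + N)
      · have heq : pvRootOf roots (p + N) = r0 := (hroots _ hq0 hq1).mpr hmem
        rw [if_neg (by rw [hf.2.1, heq]; simp)]
        unfold pvVis at hmem
        simp only [hgw, hmem, Bool.true_and]
        exact ih _ hf.1 (fun q hq => hb q (List.mem_cons_of_mem _ hq))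
          (fun q hq0 hq1 => by rw [hf.2.2 q hq0 hq1]; exact hroots q hq0 hq1)
      · have hne2 : pvRootOf roots (p + N) ≠ r0 := fun he => hmem ((hroots _ hq0 hq1).mp he)
        rw [if_pos (by rw [hf.2.1]; exact fun he => hne2 he.symm)]
        have hfalse : PySem.List.pyGetD V (p + N) false = false := by
          unfold pvVis at hmem
          simpa using hmem
        simp [hgw, hfalse]
-- ===== VERDICT (by name: the statement is the Claim_ definition above) =====
theorem solve_spec : Claim_equal_solve := by
  intro grid plan _ hpre
  obtain ⟨hne, hhead, hplan, _⟩ := hpre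
  show solve grid plan = solve_alt grid plan
  cases plan with
  | nil => exact absurd rfl hne
  | cons p0 rest =>
    have hp00 : 0 ≤ p0 := by simpa using hhead
    have hp01 : p0 < (grid.length : Int) := (hplan p0 List.mem_cons_self).2
    simp only [solve, solve_alt]
    have hfull := pvDsu_inv grid grid.length
    set R := (PySem.List.pyRange 0 ((grid.length : Nat) : Int) 1).foldl
      (fun roots a =>
        (PySem.List.pyRange (a + 1) ((grid.length : Nat) : Int) 1).foldl
          (fun r b => pvUnion grid r a b) roots)
      (PySem.List.pyRange 0 ((grid.length : Nat) : Int) 1) with hR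
    have hfind := pvFindRoot_spec hfull.1 hp00 hp01
    -- flood fill side
    have hlenrep : (List.replicate grid.length (false : Bool)).length = grid.length := by simp
    have hvis0 : ∀ c : Int, 0 ≤ c → c < ((grid.length : Nat) : Int) →
        (pvVis (PySem.List.pySetD (List.replicate grid.length false) p0 true) c ↔ c = p0) := by
      intro c hc0 hc1
      unfold pvVis
      rw [pvSet_getG hlenrep true false hp00 hp01 hc0 hc1]
      by_cases he : c = p0
      · simp [he]
      · rw [if_neg he]
        rw [PySem.List.pyGetD_eq_getElem _ false hc0 (by omega)]
        simp [he]
    have hgood0 : pvGood grid grid.length p0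
        (PySem.List.pySetD (List.replicate grid.length false) p0 true) [p0] := by
      refine ⟨by rw [PySem.List.length_pySetD]; exact hlenrep, ⟨hp00, hp01⟩,
        (hvis0 p0 hp00 hp01).mpr rfl, ?_, ?_, ?_⟩
      · intro c hc0 hc1 hc
        rw [hvis0 c hc0 hc1] at hc
        subst hc
        exact Relation.ReflTransGen.refl
      · intro u hu
        simp only [List.mem_singleton] at hu
        subst hu
        exact ⟨hp00, hp01, (hvis0 u hp00 hp01).mpr rfl⟩
      · intro u hu0 hu1 hu v _
        rw [hvis0 u hu0 hu1] at hu
        subst hu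
        exact Or.inr List.mem_cons_self
    have hmeas0 : ([p0] : List Int).length +
        pvUnvis grid.length (PySem.List.pySetD (List.replicate grid.length false) p0 true) ≤
          grid.length + 1 := by
      have h2 := List.length_filter_le
        (fun v => !(PySem.List.pyGetD
          (PySem.List.pySetD (List.replicate grid.length false) p0 true) v false))
        (PySem.List.pyRange 0 ((grid.length : Nat) : Int) 1)
      rw [PySem.List.length_pyRange_one] at h2
      unfold pvUnvis
      simp only [List.length_singleton]
      omega
    obtain ⟨f0, f1, f2, f3⟩ := pvFlood_spec (grid.length + 1)
      (PySem.List.pySetD (List.replicate grid.length false) p0 true) [p0] hgood0 hmeas0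
    set V := pvFlood grid ((grid.length : Nat) : Int) (grid.length + 1)
      (PySem.List.pySetD (List.replicate grid.length false) p0 true) [p0] with hV
    have hVp0 : pvVis V p0 := f1 p0 hp00 hp01 ((hvis0 p0 hp00 hp01).mpr rfl)
    -- the pointwise bridge
    have hiff : ∀ q : Int, 0 ≤ q → q < ((grid.length : Nat) : Int) →
        (pvRootOf R q = (pvFindRoot R p0).2 ↔ pvVis V q) := by
      intro q hq0 hq1
      rw [hfind.2.1]
      rw [hfull.2 q p0 hq0 hq1 hp00 hp01]
      have hc1 : pvConn grid grid.length (pvPairs grid.length) q p0 ↔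
          Relation.ReflTransGen (pvE grid grid.length) q p0 :=
        pvRtg_congr (pvEp_pairs grid grid.length)
      rw [hc1]
      constructor
      · intro h
        exact pvReach_mem hVp0 f3 (pvRtg_symm (pvE_symm grid grid.length) h)
      · intro h
        exact pvRtg_symm (pvE_symm grid grid.length) (f2 q hq0 hq1 h)
    have hB : ((p0 :: rest).all (fun c => PySem.List.pyGetD V c false)) =
        (rest.all (fun c => PySem.List.pyGetD V c false)) := by
      rw [List.all_cons]
      unfold pvVis at hVp0
      rw [hVp0]
      simp
    rw [hB]
    exact pvCheckA_eq f0 rest (pvFindRoot R p0).1 hfind.1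
      (fun q hq => hplan q (List.mem_cons_of_mem _ hq))
      (fun q hq0 hq1 => by rw [hfind.2.2 q hq0 hq1]; exact hiff q hq0 hq1)
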